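-- pv_equiv track=rewrite | github.com/SOLSD/New-Power-Index | algo_work/program_files/find_mwc.py | minimal_test
-- ===== SOURCE A (Python) =====
-- def minimal_test(combination, total, target):
--     """
--     Takes combination and checks if it is minimal
--
--     The each party's votes are removed from the total one at a time
--     and if for all parties, each time that happens the total is
--     smaller than the target, the combination is minimal.
--     """
--     count = 0
--     for i in range(len(combination)):
--         check = total - combination[i][0]  # Removes one party from coalition one at a time to check if minimal
--         if check < target:
--             count += 1  # Every time the coalitions total falls under the target is counted.
--     if count == len(combination) and total >= target:  # If the removal of every party in the coalition results in the
--         # rest not reaching the target then the coalition is minimal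
--         return True
--     return False
-- ===== SOURCE B (Python) =====
-- def minimal_test(combination, total, target):
--     if total < target:
--         return False
--     votes = sorted(c[0] for c in combination)
--     return not votes or total - votes[0] < target
-- ===== Notes on version B (the rewrite author's own statement) =====
-- stated objective: alternative
-- what changed: Replaces A's per-party count-of-shortfalls loop (count == len test) with a sort-then-check-head strategy: sort the first-party votes and test criticality only for the smallest one, since removing the smallest party leaves the largest residual.
import Mathlib
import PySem

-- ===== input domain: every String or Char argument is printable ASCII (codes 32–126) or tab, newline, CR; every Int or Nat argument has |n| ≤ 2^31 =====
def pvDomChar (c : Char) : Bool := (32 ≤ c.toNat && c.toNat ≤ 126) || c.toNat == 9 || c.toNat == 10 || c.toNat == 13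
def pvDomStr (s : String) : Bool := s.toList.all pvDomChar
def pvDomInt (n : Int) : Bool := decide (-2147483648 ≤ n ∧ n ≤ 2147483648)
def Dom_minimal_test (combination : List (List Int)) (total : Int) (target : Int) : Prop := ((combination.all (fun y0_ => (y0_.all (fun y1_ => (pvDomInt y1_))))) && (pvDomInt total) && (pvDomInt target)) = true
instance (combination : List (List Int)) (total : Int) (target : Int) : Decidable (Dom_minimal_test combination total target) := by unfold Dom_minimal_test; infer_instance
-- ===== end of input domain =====

-- B replaces A's per-party count-of-shortfalls loop by sorting the first-party votes and
-- testing criticality only for the smallest one; objective: alternative decomposition.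

-- ===== PORT A =====
-- count = 0; for i in range(len(combination)): check = total - combination[i][0]; if check < target: count += 1
-- (the loop reads each element once, so it is folded over the list itself; combination[i][0]
-- is (·.headD 0), exact under Pre_ which requires every inner list nonempty)
def minimal_test (combination : List (List Int)) (total : Int) (target : Int) : Bool :=
  let count : Int :=
    combination.foldl (fun cnt c => if total - c.headD 0 < target then cnt + 1 else cnt) 0
  if count = (combination.length : Int) ∧ total ≥ target then true else false

-- ===== PORT B =====
def minimal_test_alt (combination : List (List Int)) (total : Int) (target : Int) : Bool :=
  if total < target then false
  else
    -- votes = sorted(c[0] for c in combination); c[0] is (·.headD 0), exact under Pre_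
    let votes := PySem.List.sorted (combination.map (fun c => c.headD 0)) (fun x => x) false
    match votes with
    | [] => true
    | v :: _ => decide (total - v < target)

-- ===== PRECONDITION & SPEC =====
-- Pre_ excludes combinations containing an empty inner list: there A (and B) raise IndexError
-- on c[0].
def Pre_minimal_test (combination : List (List Int)) (total : Int) (target : Int) : Prop :=
  ∀ c ∈ combination, c ≠ []
instance (combination : List (List Int)) (total : Int) (target : Int) : Decidable (Pre_minimal_test combination total target) := by unfold Pre_minimal_test; infer_instance
def pvWitness_minimal_test : List (List Int) × Int × Int := ([[3], [4, 1]], 7, 5)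

def Spec_minimal_test (combination : List (List Int)) (total : Int) (target : Int) (out : Bool) : Prop := out = minimal_test_alt combination total target
instance (combination : List (List Int)) (total : Int) (target : Int) (out : Bool) : Decidable (Spec_minimal_test combination total target out) := by unfold Spec_minimal_test; infer_instance

-- ===== CLAIM (what is proved, stated in full; the proofs are below) =====
def Claim_equal_minimal_test : Prop := ∀ (combination : List (List Int)) (total : Int) (target : Int), Dom_minimal_test combination total target → Pre_minimal_test combination total target → Spec_minimal_test combination total target (minimal_test combination total target)

-- ===== LEMMAS AND PROOFS =====

-- A's count equals the length iff every party is critical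
theorem count_eq_len_iff (combination : List (List Int)) (total target : Int) :
    (List.countP (fun c => decide (total - c.headD 0 < target)) combination
      = combination.length)
    ↔ ∀ c ∈ combination, total - c.headD 0 < target := by
  rw [List.countP_eq_length]; simp

-- ===== VERDICT (by name: the statement is the Claim_ definition above) =====
theorem minimal_test_spec : Claim_equal_minimal_test := by
  intro combination total target _hDom _hPre
  have hfold : combination.foldl (fun cnt c => if total - c.headD 0 < target then cnt + 1 else cnt) 0
      = (List.countP (fun c => decide (total - c.headD 0 < target)) combination : Int) := by
    simpa using PySem.List.foldl_count_if (fun c : List Int => decide (total - c.headD 0 < target)) combination 0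
  unfold Spec_minimal_test minimal_test minimal_test_alt
  simp only [hfold]
  by_cases hwin : total < target
  · have : ¬ (total ≥ target) := by omega
    simp [hwin, this]
  · simp only [hwin, if_false]
    rcases hs : PySem.List.sorted (combination.map (fun c => c.headD 0)) (fun x => x) false
      with _ | ⟨v, tail⟩
    · -- sorted is [] iff combination is []
      have : combination.map (fun c => c.headD 0) = [] :=
        (PySem.List.sorted_eq_nil_iff ..).mp hs
      have hc : combination = [] := by
        cases combination with
        | nil => rfl
        | cons _ _ => simp at this
      subst hc
      rw [hs]
      simp only [List.countP_nil, List.map_nil, List.length_nil, Nat.cast_zero]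
      simp
      omega
    · -- v is the minimum of the first-party votes, and is itself one of them
      have hmin : ∀ y ∈ combination.map (fun c => c.headD 0), v ≤ y :=
        PySem.List.key_head_sorted_le _ _ hs
      have hvmem : v ∈ combination.map (fun c => c.headD 0) := by
        have : v ∈ PySem.List.sorted (combination.map (fun c => c.headD 0)) (fun x => x) false := by
          rw [hs]; exact List.mem_cons_self ..
        exact (PySem.List.mem_sorted ..).mp this
      rw [hs]
      split_ifs with h
      · obtain ⟨h1, _⟩ := h
        have hall := (count_eq_len_iff combination total target).mp (by exact_mod_cast h1)
        symm; rw [decide_eq_true_eq]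
        obtain ⟨c, hc, rfl⟩ := List.mem_map.mp hvmem
        exact hall c hc
      · symm; simp only [decide_eq_false_iff_not]
        intro hv
        apply h
        refine ⟨?_, by omega⟩
        have : List.countP (fun c => decide (total - c.headD 0 < target)) combination
            = combination.length := by
          refine (count_eq_len_iff combination total target).mpr ?_
          intro c hc
          have : v ≤ c.headD 0 := hmin _ (List.mem_map.mpr ⟨c, hc, rfl⟩)
          omega
        exact_mod_cast this
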